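-- pv_equiv track=rewrite | github.com/matijapretnar/uvod-v-programiranje | 10-nakljucna-stevila/matematiki/cankar.py | slovar_sosednosti
-- ===== SOURCE A (Python) =====
-- def slovar_sosednosti(besede):
--     sosednost = {}
--     for i in range(len(besede) - 1):
--         prva, druga = besede[i], besede[i + 1]
--         if prva not in sosednost:
--             sosednost[prva] = {}
--         sosednost[prva][druga] = sosednost[prva].get(druga, 0) + 1
--     return sosednost
-- ===== SOURCE B (Python) =====
-- def slovar_sosednosti(besede):
--     # pass 1: flat counter keyed by the adjacent pair
--     stevec = {}
--     for par in zip(besede, besede[1:]):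
--         stevec[par] = stevec.get(par, 0) + 1
--     # pass 2: regroup the flat counts into the nested dict
--     sosednost = {}
--     for (prva, druga), n in stevec.items():
--         if prva not in sosednost:
--             sosednost[prva] = {}
--         sosednost[prva][druga] = n
--     return sosednost
-- ===== Notes on version B (the rewrite author's own statement) =====
-- stated objective: alternative
-- what changed: Instead of building the nested dict directly while scanning indices, B first builds a flat tuple-keyed frequency table over zip(besede, besede[1:]) and then regroups that table into the nested dict in a second pass.
import Mathlib
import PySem

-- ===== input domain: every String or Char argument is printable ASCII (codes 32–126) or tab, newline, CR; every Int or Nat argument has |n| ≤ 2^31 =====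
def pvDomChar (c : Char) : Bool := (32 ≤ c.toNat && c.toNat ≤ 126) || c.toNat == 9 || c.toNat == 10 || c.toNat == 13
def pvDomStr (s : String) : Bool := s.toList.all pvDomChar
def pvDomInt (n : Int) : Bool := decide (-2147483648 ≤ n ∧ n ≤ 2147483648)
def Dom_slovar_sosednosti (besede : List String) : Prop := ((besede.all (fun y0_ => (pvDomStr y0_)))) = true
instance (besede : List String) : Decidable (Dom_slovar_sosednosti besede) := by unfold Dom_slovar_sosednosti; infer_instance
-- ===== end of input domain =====

-- B builds a flat pair-keyed counter in one pass and regroups it into the nested dict in a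
-- second pass, instead of A's direct nested-dict build over indices (objective: alternative).

-- ===== PORT A =====
def slovar_sosednosti (besede : List String) : List (String × List (String × Int)) :=
  let sosednost := (PySem.List.pyRange 0 ((besede.length : Int) - 1) 1).foldl
    (fun d i =>
      let prva := PySem.List.pyGetD besede i ""
      let druga := PySem.List.pyGetD besede (i + 1) ""
      let d := if d.contains prva then d else d.insert prva PySem.Dict.empty
      d.insert prva ((d.getD prva PySem.Dict.empty).insert druga
        ((d.getD prva PySem.Dict.empty).getD druga 0 + 1)))
    PySem.Dict.empty
  sosednost.items.map (fun p => (p.1, p.2.items))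

-- ===== PORT B =====
def slovar_sosednosti_alt (besede : List String) : List (String × List (String × Int)) :=
  let pari := besede.zip (PySem.List.slice besede (some 1) none)
  let stevec := pari.foldl (fun d par => d.insert par (d.getD par 0 + 1))
    (PySem.Dict.empty : PySem.Dict (String × String) Int)
  let sosednost := stevec.items.foldl
    (fun d it =>
      let prva := it.1.1
      let druga := it.1.2
      let d := if d.contains prva then d else d.insert prva PySem.Dict.empty
      d.insert prva ((d.getD prva PySem.Dict.empty).insert druga it.2))
    PySem.Dict.empty
  sosednost.items.map (fun p => (p.1, p.2.items))

-- ===== PRECONDITION & SPEC =====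
def Spec_slovar_sosednosti (besede : List String) (out : List (String × List (String × Int))) : Prop := out = slovar_sosednosti_alt besede
instance (besede : List String) (out : List (String × List (String × Int))) : Decidable (Spec_slovar_sosednosti besede out) := by unfold Spec_slovar_sosednosti; infer_instance

-- ===== CLAIM (what is proved, stated in full; the proofs are below) =====
def Claim_equal_slovar_sosednosti : Prop := ∀ (besede : List String), Dom_slovar_sosednosti besede → Spec_slovar_sosednosti besede (slovar_sosednosti besede)

-- ===== LEMMAS AND PROOFS =====

-- nested set d[a][b] = v (creating d[a] when absent) and nested lookup d[a].get(b, 0)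
def pvNS (d : PySem.Dict String (PySem.Dict String Int)) (a b : String) (v : Int) :
    PySem.Dict String (PySem.Dict String Int) :=
  d.insert a ((d.getD a PySem.Dict.empty).insert b v)

def pvNG (d : PySem.Dict String (PySem.Dict String Int)) (a b : String) : Int :=
  (d.getD a PySem.Dict.empty).getD b 0

-- the 'ensure key then set' step of both Pythons is pvNS
theorem pv_step_eq_ns (d : PySem.Dict String (PySem.Dict String Int)) (a b : String) (v : Int) :
    ((if d.contains a then d else d.insert a PySem.Dict.empty).insert a
      (((if d.contains a then d else d.insert a PySem.Dict.empty).getD a PySem.Dict.empty).insert b v))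
      = pvNS d a b v := by
  by_cases h : d.contains a = true
  · simp only [pvNS, h, if_true]
  · have h' : d.contains a = false := by simpa using h
    simp only [pvNS, h', Bool.false_eq_true, if_false, PySem.Dict.getD_insert_self,
      PySem.Dict.insert_insert_self, PySem.Dict.getD_of_not_contains d _ h']

-- A's step also reads the old count through the ensured dict; that is pvNG
theorem pv_stepA_eq (d : PySem.Dict String (PySem.Dict String Int)) (a b : String) :
    ((if d.contains a then d else d.insert a PySem.Dict.empty).insert a
      (((if d.contains a then d else d.insert a PySem.Dict.empty).getD a PySem.Dict.empty).insert b
        (((if d.contains a then d else d.insert a PySem.Dict.empty).getD a PySem.Dict.empty).getD b 0 + 1)))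
      = pvNS d a b (pvNG d a b + 1) := by
  by_cases h : d.contains a = true
  · simp only [pvNS, pvNG, h, if_true]
  · have h' : d.contains a = false := by simpa using h
    simp only [pvNS, pvNG, h', Bool.false_eq_true, if_false, PySem.Dict.getD_insert_self,
      PySem.Dict.insert_insert_self, PySem.Dict.getD_of_not_contains d _ h', PySem.Dict.getD_empty]

-- two inserts at distinct keys commute when the first key is already present
theorem pv_insert_comm {κ ν : Type} [BEq κ] [LawfulBEq κ] [DecidableEq κ]
    (d : PySem.Dict κ ν) (k k' : κ) (v v' : ν) (hne : k ≠ k') (hk : d.contains k = true) :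
    (d.insert k v).insert k' v' = (d.insert k' v').insert k v := by
  apply PySem.Dict.ext
  by_cases hk' : d.contains k' = true
  · rw [PySem.Dict.items_insert_of_contains _ v'
        (by rw [PySem.Dict.contains_insert]; simp [hk']),
      PySem.Dict.items_insert_of_contains d v hk,
      PySem.Dict.items_insert_of_contains _ v
        (by rw [PySem.Dict.contains_insert]; simp [hk]),
      PySem.Dict.items_insert_of_contains d v' hk', List.map_map, List.map_map]
    refine List.map_congr_left fun p _ => ?_
    simp only [Function.comp_apply]
    by_cases h1 : p.1 = k <;> by_cases h2 : p.1 = k' <;>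
      simp_all [beq_iff_eq, Ne.symm hne]
  · have hk'' : d.contains k' = false := by simpa using hk'
    rw [PySem.Dict.items_insert_of_not_contains _ v'
        (by rw [PySem.Dict.contains_insert]; simp [hk'', Ne.symm hne]),
      PySem.Dict.items_insert_of_contains d v hk,
      PySem.Dict.items_insert_of_contains _ v
        (by rw [PySem.Dict.contains_insert]; simp [hk]),
      PySem.Dict.items_insert_of_not_contains d v' hk'', List.map_append]
    simp [beq_iff_eq, Ne.symm hne]

-- overwriting the same slot twice collapses
theorem pv_ns_ns (d : PySem.Dict String (PySem.Dict String Int)) (a b : String) (n m : Int) :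
    pvNS (pvNS d a b n) a b m = pvNS d a b m := by
  simp [pvNS, PySem.Dict.insert_insert_self, PySem.Dict.getD_insert_self]

def pvG (d : PySem.Dict String (PySem.Dict String Int)) (it : (String × String) × Int) :
    PySem.Dict String (PySem.Dict String Int) :=
  pvNS d it.1.1 it.1.2 it.2

theorem pv_ng_g (d : PySem.Dict String (PySem.Dict String Int)) (a b : String)
    (q : (String × String) × Int) (hq : q.1 ≠ (a, b)) : pvNG (pvG d q) a b = pvNG d a b := by
  obtain ⟨⟨a', b'⟩, w⟩ := q
  simp only [pvG, pvNS, pvNG]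
  by_cases ha : a' = a
  · subst ha
    have hb : b ≠ b' := fun h => hq (by simp [h])
    rw [PySem.Dict.getD_insert_self, PySem.Dict.getD_insert_of_ne _ _ _ hb]
  · rw [PySem.Dict.getD_insert_of_ne _ _ _ (Ne.symm ha)]

def pvNMem (d : PySem.Dict String (PySem.Dict String Int)) (a b : String) : Prop :=
  (d.getD a PySem.Dict.empty).contains b = true

theorem pv_nmem_contains (d : PySem.Dict String (PySem.Dict String Int)) (a b : String)
    (h : pvNMem d a b) : d.contains a = true := by
  by_contra hc
  have hc' : d.contains a = false := by simpa using hc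
  rw [pvNMem, PySem.Dict.getD_of_not_contains d _ hc', PySem.Dict.contains_empty] at h
  exact Bool.false_ne_true h

theorem pv_g_ns_comm (d : PySem.Dict String (PySem.Dict String Int)) (a b : String) (m : Int)
    (q : (String × String) × Int) (hq : q.1 ≠ (a, b)) (hmem : pvNMem d a b) :
    pvG (pvNS d a b m) q = pvNS (pvG d q) a b m := by
  obtain ⟨⟨a', b'⟩, w⟩ := q
  have hca : d.contains a = true := pv_nmem_contains d a b hmem
  simp only [pvG, pvNS]
  by_cases ha : a' = a
  · subst ha
    have hb : b ≠ b' := fun h => hq (by simp [h])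
    rw [PySem.Dict.getD_insert_self, PySem.Dict.insert_insert_self,
      PySem.Dict.getD_insert_self, PySem.Dict.insert_insert_self,
      pv_insert_comm _ b b' m w hb hmem]
  · rw [PySem.Dict.getD_insert_of_ne _ _ _ ha,
      PySem.Dict.getD_insert_of_ne _ _ _ (Ne.symm ha),
      pv_insert_comm d a a' _ _ (Ne.symm ha) hca]

theorem pv_nmem_g (d : PySem.Dict String (PySem.Dict String Int)) (a b : String)
    (q : (String × String) × Int) (hmem : pvNMem d a b) : pvNMem (pvG d q) a b := by
  obtain ⟨⟨a', b'⟩, w⟩ := q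
  simp only [pvG, pvNS, pvNMem] at *
  by_cases ha : a' = a
  · subst ha
    rw [PySem.Dict.getD_insert_self, PySem.Dict.contains_insert]
    simp [hmem]
  · rwa [PySem.Dict.getD_insert_of_ne _ _ _ (Ne.symm ha)]

theorem pv_nmem_ns (d : PySem.Dict String (PySem.Dict String Int)) (a b : String) (m : Int) :
    pvNMem (pvNS d a b m) a b := by
  simp [pvNMem, pvNS, PySem.Dict.getD_insert_self]

-- folding items with no key (a,b) commutes with setting slot (a,b) (present in d)
theorem pv_foldl_ns_comm (t : List ((String × String) × Int))
    (d : PySem.Dict String (PySem.Dict String Int)) (a b : String) (m : Int)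
    (hnot : (a, b) ∉ t.map Prod.fst) (hmem : pvNMem d a b) :
    List.foldl pvG (pvNS d a b m) t = pvNS (List.foldl pvG d t) a b m := by
  induction t generalizing d with
  | nil => rfl
  | cons q t ih =>
    simp only [List.map_cons, List.mem_cons] at hnot
    push_neg at hnot
    simp only [List.foldl_cons]
    rw [pv_g_ns_comm d a b m q (fun h => hnot.1 h.symm) hmem]
    exact ih (pvG d q) hnot.2 (pv_nmem_g d a b q hmem)

theorem pv_map_noop (t : List ((String × String) × Int)) (a b : String) (m : Int)
    (h : (a, b) ∉ t.map Prod.fst) :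
    t.map (fun q => if q.1 == (a, b) then ((a, b), m) else q) = t := by
  induction t with
  | nil => rfl
  | cons x t ih =>
    simp only [List.map_cons, List.mem_cons] at h
    push_neg at h
    simp only [List.map_cons, ih h.2, List.cons.injEq, and_true]
    rw [if_neg (by simp [beq_iff_eq]; exact fun hx => h.1 hx.symm)]

-- replacing the value at key p inside the items list = nested overwrite at the end
theorem pv_foldl_replace (L : List ((String × String) × Int)) (a b : String) (m : Int)
    (d : PySem.Dict String (PySem.Dict String Int))
    (hnd : (L.map Prod.fst).Nodup) (hp : (a, b) ∈ L.map Prod.fst) :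
    List.foldl pvG d (L.map (fun q => if q.1 == (a, b) then ((a, b), m) else q)) =
      pvNS (List.foldl pvG d L) a b m := by
  induction L generalizing d with
  | nil => simp at hp
  | cons q t ih =>
    simp only [List.map_cons, List.nodup_cons] at hnd
    simp only [List.map_cons, List.foldl_cons]
    by_cases hq : q.1 = (a, b)
    · have hnot : (a, b) ∉ t.map Prod.fst := hq ▸ hnd.1
      rw [if_pos (by simp [hq]), pv_map_noop t a b m hnot]
      have h1 : pvG d q = pvNS d a b q.2 := by simp [pvG, hq]
      have h2 : pvG d ((a, b), m) = pvNS d a b m := rfl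
      rw [h1, h2, ← pv_foldl_ns_comm t (pvNS d a b q.2) a b m hnot (pv_nmem_ns d a b q.2),
        pv_ns_ns]
    · rw [if_neg (by simp [hq, beq_iff_eq])]
      have hp' : (a, b) ∈ t.map Prod.fst := by
        rcases List.mem_cons.mp hp with h | h
        · exact absurd h.symm hq
        · exact h
      exact ih (pvG d q) hnd.2 hp'

-- nested lookup through a fold: absent key leaves it, present key gives its value
theorem pv_ng_foldl_not_mem (L : List ((String × String) × Int))
    (d : PySem.Dict String (PySem.Dict String Int)) (a b : String)
    (hnot : (a, b) ∉ L.map Prod.fst) :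
    pvNG (List.foldl pvG d L) a b = pvNG d a b := by
  induction L generalizing d with
  | nil => rfl
  | cons q t ih =>
    simp only [List.map_cons, List.mem_cons] at hnot
    push_neg at hnot
    rw [List.foldl_cons, ih (pvG d q) hnot.2, pv_ng_g d a b q (fun h => hnot.1 h.symm)]

theorem pv_ng_foldl_mem (L : List ((String × String) × Int))
    (d : PySem.Dict String (PySem.Dict String Int)) (a b : String) (n : Int)
    (hnd : (L.map Prod.fst).Nodup) (hp : ((a, b), n) ∈ L) :
    pvNG (List.foldl pvG d L) a b = n := by
  induction L generalizing d with
  | nil => simp at hp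
  | cons q t ih =>
    simp only [List.map_cons, List.nodup_cons] at hnd
    rw [List.foldl_cons]
    rcases List.mem_cons.mp hp with h | h
    · subst h
      have hnot : (a, b) ∉ t.map Prod.fst := hnd.1
      rw [pv_ng_foldl_not_mem t _ a b hnot]
      simp [pvG, pvNS, pvNG, PySem.Dict.getD_insert_self]
    · exact ih (pvG d q) hnd.2 h

def pvRG (c : PySem.Dict (String × String) Int) : PySem.Dict String (PySem.Dict String Int) :=
  c.items.foldl pvG PySem.Dict.empty

theorem pv_ng_rg (c : PySem.Dict (String × String) Int) (a b : String)
    (hnd : c.keys.Nodup) : pvNG (pvRG c) a b = c.getD (a, b) 0 := by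
  have hnd' : (c.items.map Prod.fst).Nodup := hnd
  cases hg : c.get? (a, b) with
  | some n =>
    rw [pvRG, pv_ng_foldl_mem c.items _ a b n hnd'
      (PySem.Dict.mem_items_of_get?_eq_some c hg), PySem.Dict.getD_eq_get?_getD, hg]
    rfl
  | none =>
    have hnot : (a, b) ∉ c.items.map Prod.fst :=
      (PySem.Dict.get?_eq_none_iff_not_mem_keys c _).mp hg
    rw [pvRG, pv_ng_foldl_not_mem c.items _ a b hnot, PySem.Dict.getD_eq_get?_getD, hg]
    simp [pvNG, PySem.Dict.getD_empty]

-- the key step: regrouping after a counter bump = one direct nested step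
theorem pv_rg_insert (c : PySem.Dict (String × String) Int) (a b : String) (m : Int)
    (hnd : c.keys.Nodup) :
    pvRG (c.insert (a, b) m) = pvNS (pvRG c) a b m := by
  by_cases hc : c.contains (a, b) = true
  · rw [pvRG, pvRG, PySem.Dict.items_insert_of_contains c m hc]
    exact pv_foldl_replace c.items a b m _ hnd
      ((PySem.Dict.contains_iff_mem_keys c _).mp hc)
  · have hc' : c.contains (a, b) = false := by simpa using hc
    rw [pvRG, pvRG, PySem.Dict.items_insert_of_not_contains c m hc', List.foldl_append]
    rfl

theorem pv_main (ps : List (String × String)) (c : PySem.Dict (String × String) Int)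
    (hnd : c.keys.Nodup) :
    List.foldl (fun d p => pvNS d p.1 p.2 (pvNG d p.1 p.2 + 1)) (pvRG c) ps =
      pvRG (List.foldl (fun c p => c.insert p (c.getD p 0 + 1)) c ps) := by
  induction ps generalizing c with
  | nil => rfl
  | cons p t ih =>
    simp only [List.foldl_cons]
    rw [show pvNS (pvRG c) p.1 p.2 (pvNG (pvRG c) p.1 p.2 + 1)
          = pvRG (c.insert p (c.getD p 0 + 1)) from by
        rw [pv_ng_rg c p.1 p.2 hnd, ← pv_rg_insert c p.1 p.2 _ hnd]]
    exact ih _ (PySem.Dict.nodup_keys_insert _ _ _ hnd)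

-- the index loop of A reads exactly the adjacent pairs
theorem pv_map_range_pairs (xs : List String) :
    (PySem.List.pyRange 0 ((xs.length : Int) - 1) 1).map
      (fun i => (PySem.List.pyGetD xs i "", PySem.List.pyGetD xs (i + 1) "")) =
      xs.zip xs.tail := by
  rw [PySem.List.pyRange_one, List.map_map]
  apply List.ext_getElem
  · simp only [List.length_map, List.length_range, List.length_zip, List.length_tail]
    omega
  · intro i h1 h2
    simp only [List.length_map, List.length_range] at h1
    have hi : i + 1 < xs.length := by omega
    simp only [List.getElem_map, List.getElem_range, Function.comp_apply, List.getElem_zip,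
      List.getElem_tail]
    have e1 : PySem.List.pyGetD xs ((0 : Int) + (i : Nat)) "" = xs[i] := by
      rw [PySem.List.pyGetD_eq_getElem xs "" (by omega) (by omega)]
      simp
    have e2 : PySem.List.pyGetD xs ((0 : Int) + (i : Nat) + 1) "" = xs[i + 1] := by
      rw [PySem.List.pyGetD_eq_getElem xs "" (by omega) (by omega)]
      congr 1
      omega
    rw [e1, e2]

-- ===== VERDICT (by name: the statement is the Claim_ definition above) =====
theorem slovar_sosednosti_spec : Claim_equal_slovar_sosednosti := by
  intro besede _
  show _ = _
  unfold slovar_sosednosti slovar_sosednosti_alt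
  dsimp only
  rw [PySem.List.slice_from_one]
  have hd :
    (PySem.List.pyRange 0 ((besede.length : Int) - 1) 1).foldl
        (fun d i =>
          (if d.contains (PySem.List.pyGetD besede i "") then d
            else d.insert (PySem.List.pyGetD besede i "") PySem.Dict.empty).insert
            (PySem.List.pyGetD besede i "")
            (((if d.contains (PySem.List.pyGetD besede i "") then d
                else d.insert (PySem.List.pyGetD besede i "")
                  PySem.Dict.empty).getD (PySem.List.pyGetD besede i "")
                PySem.Dict.empty).insert (PySem.List.pyGetD besede (i + 1) "")
              (((if d.contains (PySem.List.pyGetD besede i "") then d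
                  else d.insert (PySem.List.pyGetD besede i "")
                    PySem.Dict.empty).getD (PySem.List.pyGetD besede i "")
                  PySem.Dict.empty).getD (PySem.List.pyGetD besede (i + 1) "") 0 + 1)))
        PySem.Dict.empty
      = ((besede.zip besede.tail).foldl
          (fun d par => d.insert par (d.getD par 0 + 1))
          (PySem.Dict.empty : PySem.Dict (String × String) Int)).items.foldl
          (fun d it =>
            (if d.contains it.1.1 then d else d.insert it.1.1 PySem.Dict.empty).insert it.1.1
              (((if d.contains it.1.1 then d
                  else d.insert it.1.1 PySem.Dict.empty).getD it.1.1
                  PySem.Dict.empty).insert it.1.2 it.2)) PySem.Dict.empty := by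
    calc
      _ = (PySem.List.pyRange 0 ((besede.length : Int) - 1) 1).foldl
            (fun d i => pvNS d (PySem.List.pyGetD besede i "") (PySem.List.pyGetD besede (i + 1) "")
              (pvNG d (PySem.List.pyGetD besede i "") (PySem.List.pyGetD besede (i + 1) "") + 1))
            PySem.Dict.empty := List.foldl_ext _ _ _ (fun d i _ => pv_stepA_eq d _ _)
      _ = ((PySem.List.pyRange 0 ((besede.length : Int) - 1) 1).map
            (fun i => (PySem.List.pyGetD besede i "", PySem.List.pyGetD besede (i + 1) ""))).foldl
            (fun d p => pvNS d p.1 p.2 (pvNG d p.1 p.2 + 1)) PySem.Dict.empty := by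
          rw [List.foldl_map]
      _ = (besede.zip besede.tail).foldl
            (fun d p => pvNS d p.1 p.2 (pvNG d p.1 p.2 + 1)) PySem.Dict.empty := by
          rw [pv_map_range_pairs]
      _ = pvRG ((besede.zip besede.tail).foldl
            (fun c p => c.insert p (c.getD p 0 + 1)) PySem.Dict.empty) := by
          rw [← pv_main (besede.zip besede.tail) PySem.Dict.empty PySem.Dict.nodup_keys_empty]
          rfl
      _ = _ := by
          rw [pvRG]
          exact List.foldl_ext _ _ _ (fun d it _ => (pv_step_eq_ns d it.1.1 it.1.2 it.2).symm)
  exact congrArg (fun d => d.items.map (fun p => (p.1, p.2.items))) hd
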